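-- pv_equiv track=rewrite | github.com/lauren-hu-yx/genome-read-mapper | test/read_mapper_tests.py | find_lower_bound
-- ===== SOURCE A (Python) =====
-- def find_lower_bound(substring, reference_genome):
-- 	suffix_array = sorted(range(len(reference_genome)), key=lambda x: reference_genome[x:])
-- 	left, right = 0, len(suffix_array)
-- 	while left < right:
-- 		mid = (left + right) // 2
-- 		suffix = reference_genome[suffix_array[mid] : suffix_array[mid] + len(substring)]
-- 		if suffix < substring:
-- 			left = mid + 1
-- 		else:
-- 			right = mid
-- 	return left
-- ===== SOURCE B (Python) =====
-- def find_lower_bound(substring, reference_genome):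
-- 	# The lower-bound position in the sorted suffix array equals the number of
-- 	# suffixes whose len(substring)-prefix is lexicographically < substring,
-- 	# so count those directly: one pass, no suffix array, no binary search.
-- 	m = len(substring)
-- 	count = 0
-- 	for i in range(len(reference_genome)):
-- 		if reference_genome[i:i + m] < substring:
-- 			count += 1
-- 	return count
-- ===== Notes on version B (the rewrite author's own statement) =====
-- stated objective: faster
-- what changed: Replaced building and sorting the full suffix array plus binary search by a direct one-pass count of positions whose length-m prefix is lexicographically smaller than the substring (the lower-bound index in a sorted array equals the number of elements below the key).
import Mathlib
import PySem

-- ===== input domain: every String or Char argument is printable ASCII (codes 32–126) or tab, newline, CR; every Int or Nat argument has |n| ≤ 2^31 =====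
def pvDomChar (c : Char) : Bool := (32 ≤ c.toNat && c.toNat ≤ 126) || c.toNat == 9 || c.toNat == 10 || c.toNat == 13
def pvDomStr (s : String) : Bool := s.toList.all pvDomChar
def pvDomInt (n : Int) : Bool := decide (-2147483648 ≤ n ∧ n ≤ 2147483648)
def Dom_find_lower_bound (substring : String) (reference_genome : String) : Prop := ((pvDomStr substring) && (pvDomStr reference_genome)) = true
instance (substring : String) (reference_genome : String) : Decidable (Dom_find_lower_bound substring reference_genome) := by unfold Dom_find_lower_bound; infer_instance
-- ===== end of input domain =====

-- B replaces A's suffix-array sort + binary search by a one-pass count of positions whose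
-- length-m prefix is < substring (the lower-bound index equals that count); objective: faster.

-- ===== PORT A =====
-- the while-loop of A; Python's sa[mid] always has 0 ≤ mid < len(sa) inside the loop, so
-- pyGetD with default 0 is exact; list-of-char `<` is Python's string `<` on this domain
def fl_bsearch (substring : List Char) (ref : List Char) (sa : List Int)
    (left right : Nat) : Nat :=
  if _h : left < right then
    if PySem.List.slice ref (some (PySem.List.pyGetD sa (((left + right) / 2 : Nat) : Int) 0))
        (some (PySem.List.pyGetD sa (((left + right) / 2 : Nat) : Int) 0 + (substring.length : Int)))
        < substring then
      fl_bsearch substring ref sa ((left + right) / 2 + 1) right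
    else
      fl_bsearch substring ref sa left ((left + right) / 2)
  else left
termination_by right - left
decreasing_by all_goals omega

def find_lower_bound (substring : String) (reference_genome : String) : Int :=
  let r := reference_genome.toList
  let sa := PySem.List.sorted (PySem.List.pyRange 0 (r.length : Int) 1)
      (fun x => PySem.List.slice r (some x) none)
  (fl_bsearch substring.toList r sa 0 sa.length : Int)

-- ===== PORT B =====
def find_lower_bound_alt (substring : String) (reference_genome : String) : Int :=
  let s := substring.toList
  let r := reference_genome.toList
  (PySem.List.pyRange 0 (r.length : Int) 1).foldl
    (fun count i =>
      if PySem.List.slice r (some i) (some (i + (s.length : Int))) < s then count + 1 else count)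
    0

-- ===== PRECONDITION & SPEC =====
def Spec_find_lower_bound (substring : String) (reference_genome : String) (out : Int) : Prop := out = find_lower_bound_alt substring reference_genome
instance (substring : String) (reference_genome : String) (out : Int) : Decidable (Spec_find_lower_bound substring reference_genome out) := by unfold Spec_find_lower_bound; infer_instance

-- ===== CLAIM (what is proved, stated in full; the proofs are below) =====
def Claim_equal_find_lower_bound : Prop := ∀ (substring : String) (reference_genome : String), Dom_find_lower_bound substring reference_genome → Spec_find_lower_bound substring reference_genome (find_lower_bound substring reference_genome)

-- ===== LEMMAS AND PROOFS =====

-- lexicographic `<` is monotone under `take`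
lemma take_lt_or_eq (m : Nat) {l1 l2 : List Char} (h : l1 < l2) :
    l1.take m < l2.take m ∨ l1.take m = l2.take m := by
  rw [← List.lex_lt] at h
  induction h generalizing m with
  | nil =>
    cases m with
    | zero => exact Or.inr rfl
    | succ m => exact Or.inl (by rw [← List.lex_lt]; exact List.Lex.nil)
  | rel hab =>
    cases m with
    | zero => exact Or.inr rfl
    | succ m => exact Or.inl (by rw [← List.lex_lt]; exact List.Lex.rel hab)
  | cons _ ih =>
    cases m with
    | zero => exact Or.inr rfl
    | succ m =>
      rcases @ih m with h' | h'
      · exact Or.inl (by rw [← List.lex_lt] at h' ⊢; exact List.Lex.cons h')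
      · exact Or.inr (by simp [h'])

lemma take_le_take (m : Nat) {l1 l2 : List Char} (h : l1 ≤ l2) :
    l1.take m ≤ l2.take m := by
  rcases lt_or_eq_of_le h with h' | h'
  · rcases take_lt_or_eq m h' with h'' | h''
    · exact le_of_lt h''
    · exact le_of_eq h''
  · exact le_of_eq (by rw [h'])

-- the counting loop of B is countP
lemma foldl_count {P : Int → Prop} [DecidablePred P] :
    ∀ (l : List Int) (acc : Int),
      l.foldl (fun c i => if P i then c + 1 else c) acc
        = acc + l.countP (fun i => decide (P i)) := by
  intro l
  induction l with
  | nil => intro acc; simp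
  | cons a t ih =>
    intro acc
    by_cases h : P a <;> simp [h, ih] <;> try ring

-- a list whose first res positions satisfy pb and the rest refute it has countP = res
lemma countP_boundary {α : Type} (pb : α → Bool) :
    ∀ (l : List α) (res : Nat), res ≤ l.length →
      (∀ (i : Nat) (h : i < l.length), i < res → pb l[i] = true) →
      (∀ (i : Nat) (h : i < l.length), res ≤ i → pb l[i] = false) →
      l.countP pb = res := by
  intro l
  induction l with
  | nil => intro res h _ _; simp at h; simp [h]
  | cons a t ih =>
    intro res hres hlow hhigh
    cases res with
    | zero =>
      have ha : pb a = false := hhigh 0 (by simp) (by omega)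
      have ht : t.countP pb = 0 := by
        apply ih 0 (by omega)
        · intro i h hi; omega
        · intro i h _
          exact hhigh (i + 1) (by simpa using Nat.succ_lt_succ h) (by omega)
      simp [ha, ht]
    | succ r =>
      have ha : pb a = true := hlow 0 (by simp) (by omega)
      have ht : t.countP pb = r := by
        apply ih r (by simpa using hres)
        · intro i h hi
          exact hlow (i + 1) (by simpa using Nat.succ_lt_succ h) (by omega)
        · intro i h hi
          exact hhigh (i + 1) (by simpa using Nat.succ_lt_succ h) (by omega)
      simp [ha, ht]

-- the position predicate the binary search decides
def Qpred (sub r : List Char) (sa : List Int) (p : Nat) : Prop :=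
  PySem.List.slice r (some (PySem.List.pyGetD sa (p : Int) 0))
    (some (PySem.List.pyGetD sa (p : Int) 0 + (sub.length : Int))) < sub

-- the length-m slice at a nonnegative index is `take m` of the full suffix
lemma pref_eq_take (r : List Char) (m : Nat) (i : Int) (hi : 0 ≤ i) :
    PySem.List.slice r (some i) (some (i + (m : Int)))
      = (PySem.List.slice r (some i) none).take m := by
  rw [PySem.List.slice_toNat _ hi (by omega), PySem.List.slice_from _ hi]
  congr 1
  omega

-- `sorted` does not depend on the DecidableLT instance
lemma sorted_inst_eq (xs : List Int) (key : Int → List Char) :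
    @PySem.List.sorted Int (List Char) List.instLT List.decidableLT xs key false
      = @PySem.List.sorted Int (List Char) List.instLT
          ((inferInstance : LinearOrder (List Char)).toDecidableLT) xs key false := by
  congr 1

-- key-monotonicity of `sorted`, phrased with getD
lemma sorted_getD_mono {κ : Type} [LinearOrder κ] (xs : List Int) (key : Int → κ) (p q : Nat)
    (hpq : p ≤ q) (hq : q < (PySem.List.sorted xs key).length) :
    key ((PySem.List.sorted xs key).getD p 0) ≤ key ((PySem.List.sorted xs key).getD q 0) := by
  have hp : p < (PySem.List.sorted xs key).length := by omega
  rw [List.getD_eq_getElem _ 0 hp, List.getD_eq_getElem _ 0 hq]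
  exact PySem.List.key_sorted_getElem_mono xs key hpq hq

-- downward closure of the position predicate, from key-monotonicity of the prefix
lemma dc_gen (s r : List Char) (sa : List Int)
    (hmem : ∀ i ∈ sa, 0 ≤ i)
    (hmono : ∀ (p q : Nat), p ≤ q → q < sa.length → p < sa.length →
      PySem.List.slice r (some (sa.getD p 0)) none ≤ PySem.List.slice r (some (sa.getD q 0)) none) :
    ∀ p q, p ≤ q → q < sa.length → Qpred s r sa q → Qpred s r sa p := by
  intro p q hpq hqlen hQ
  have hplen : p < sa.length := by omega
  unfold Qpred at hQ ⊢
  rw [PySem.List.pyGetD_natCast] at hQ ⊢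
  have hq0 : 0 ≤ sa.getD q 0 := hmem _ (by rw [List.getD_eq_getElem sa 0 hqlen]; exact List.getElem_mem hqlen)
  have hp0 : 0 ≤ sa.getD p 0 := hmem _ (by rw [List.getD_eq_getElem sa 0 hplen]; exact List.getElem_mem hplen)
  rw [pref_eq_take r s.length _ hq0] at hQ
  rw [pref_eq_take r s.length _ hp0]
  exact lt_of_le_of_lt (take_le_take s.length (hmono p q hpq hqlen hplen)) hQ

-- correctness of the binary search: it lands exactly on the boundary of Qpred
lemma bsearch_spec (sub r : List Char) (sa : List Int)
    (hdc : ∀ p q, p ≤ q → q < sa.length → Qpred sub r sa q → Qpred sub r sa p) :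
    ∀ (k left right : Nat), right - left ≤ k → left ≤ right → right ≤ sa.length →
      (∀ p, p < left → Qpred sub r sa p) →
      (∀ p, right ≤ p → p < sa.length → ¬ Qpred sub r sa p) →
      (∀ p, p < fl_bsearch sub r sa left right → Qpred sub r sa p) ∧
      (∀ p, fl_bsearch sub r sa left right ≤ p → p < sa.length → ¬ Qpred sub r sa p) ∧
      fl_bsearch sub r sa left right ≤ sa.length := by
  intro k
  induction k with
  | zero =>
    intro left right hk hlr hrl hl hr
    have heq : ¬ left < right := by omega
    rw [fl_bsearch, dif_neg heq]
    exact ⟨hl, fun p hp hplen => hr p (by omega) hplen, by omega⟩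
  | succ k ih =>
    intro left right hk hlr hrn hl hr
    rw [fl_bsearch]
    by_cases h : left < right
    · rw [dif_pos h]
      have hmidlt : (left + right) / 2 < right := by omega
      have hmidge : left ≤ (left + right) / 2 := by omega
      by_cases hq : Qpred sub r sa ((left + right) / 2)
      · have hq' := hq
        unfold Qpred at hq'
        rw [if_pos hq']
        apply ih ((left + right) / 2 + 1) right (by omega) (by omega) hrn
        · intro p hp
          exact hdc p ((left + right) / 2) (by omega) (by omega) hq
        · exact hr
      · have hq' : ¬ _ := fun hx => hq (by unfold Qpred; exact hx)
        rw [if_neg hq']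
        apply ih left ((left + right) / 2) (by omega) (by omega) (by omega) hl
        intro p hp hplen hQ
        exact hq (hdc ((left + right) / 2) p hp hplen hQ)
    · rw [dif_neg h]
      exact ⟨hl, fun p hp hplen => hr p (by omega) hplen, by omega⟩

-- ===== VERDICT (by name: the statement is the Claim_ definition above) =====
theorem find_lower_bound_spec : Claim_equal_find_lower_bound := by
  intro substring reference_genome _hdom
  show (fl_bsearch substring.toList reference_genome.toList
      (PySem.List.sorted (PySem.List.pyRange 0 (reference_genome.toList.length : Int) 1)
        (fun x => PySem.List.slice reference_genome.toList (some x) none)) 0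
      (PySem.List.sorted (PySem.List.pyRange 0 (reference_genome.toList.length : Int) 1)
        (fun x => PySem.List.slice reference_genome.toList (some x) none)).length : Int)
    = (PySem.List.pyRange 0 (reference_genome.toList.length : Int) 1).foldl
        (fun count i =>
          if PySem.List.slice reference_genome.toList (some i)
              (some (i + (substring.toList.length : Int))) < substring.toList
          then count + 1 else count) 0
  generalize hs : substring.toList = s
  generalize hr : reference_genome.toList = r
  generalize hsa : PySem.List.sorted (PySem.List.pyRange 0 (r.length : Int) 1)
      (fun x => PySem.List.slice r (some x) none) = sa
  -- elements of sa are the indices 0..n-1, hence nonnegative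
  have hmem : ∀ i ∈ sa, 0 ≤ i := by
    intro i hi
    rw [← hsa] at hi
    have := (PySem.List.mem_sorted (xs := PySem.List.pyRange 0 (r.length : Int) 1)
      (key := fun x => PySem.List.slice r (some x) none) (rev := false) (x := i)).mp hi
    have := (PySem.List.mem_pyRange_one).mp this
    omega
  -- downward closure
  have hdc : ∀ p q, p ≤ q → q < sa.length → Qpred s r sa q → Qpred s r sa p := by
    apply dc_gen s r sa hmem
    intro p q hpq hqlen hplen
    subst hsa
    rw [sorted_inst_eq] at hqlen ⊢
    exact sorted_getD_mono (PySem.List.pyRange 0 (r.length : Int) 1)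
      (fun x => PySem.List.slice r (some x) none) p q hpq hqlen
  -- run the binary search correctness on the full range
  obtain ⟨hall, hnone, hle⟩ := bsearch_spec s r sa hdc sa.length 0 sa.length
    (by omega) (by omega) (le_refl _)
    (fun p hp => absurd hp (by omega))
    (fun p hp hplen => absurd hplen (by omega))
  -- the boundary is the count of positions satisfying the prefix predicate
  have hcount : sa.countP
      (fun i => decide (PySem.List.slice r (some i) (some (i + (s.length : Int))) < s))
        = fl_bsearch s r sa 0 sa.length := by
    apply countP_boundary _ sa _ hle
    · intro i hilen hi
      have := hall i hi
      unfold Qpred at this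
      rw [PySem.List.pyGetD_natCast, List.getD_eq_getElem sa 0 hilen] at this
      exact decide_eq_true this
    · intro i hilen hi
      have := hnone i hi hilen
      unfold Qpred at this
      rw [PySem.List.pyGetD_natCast, List.getD_eq_getElem sa 0 hilen] at this
      exact decide_eq_false this
  -- B's loop counts the same predicate over range(n), a permutation of sa
  have hperm : sa.Perm (PySem.List.pyRange 0 (r.length : Int) 1) := by
    rw [← hsa]; exact PySem.List.sorted_perm _ _ _
  rw [foldl_count (P := fun i => PySem.List.slice r (some i) (some (i + (s.length : Int))) < s)]
  rw [← hperm.countP_eq, hcount]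
  simp
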